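-- pv_equiv track=rewrite | github.com/Enjef/Algo | 2200 - 2299/2206 - Divide Array Into Equal Pairs/2206 - Divide Array Into Equal Pairs.py | divideArray_best_memory
-- ===== SOURCE A (Python) =====
-- from typing import List
--
-- def divideArray_best_memory(nums: List[int]) -> bool:
--     d = {}
--     for i in nums:
--         d[i] = d.get(i, 0)+1
--     for key in d.keys():
--         if d[key] % 2 != 0:
--             return False
--     return True
-- ===== SOURCE B (Python) =====
-- def divideArray_best_memory(nums):
--     s = sorted(nums)
--     while s:
--         if len(s) < 2 or s[0] != s[1]:
--             return False
--         s = s[2:]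
--     return True
-- ===== Notes on version B (the rewrite author's own statement) =====
-- stated objective: alternative
-- what changed: B sorts a copy of the list and consumes it two equal elements at a time, instead of building a frequency dictionary and scanning its counts for an odd one.
import Mathlib
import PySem

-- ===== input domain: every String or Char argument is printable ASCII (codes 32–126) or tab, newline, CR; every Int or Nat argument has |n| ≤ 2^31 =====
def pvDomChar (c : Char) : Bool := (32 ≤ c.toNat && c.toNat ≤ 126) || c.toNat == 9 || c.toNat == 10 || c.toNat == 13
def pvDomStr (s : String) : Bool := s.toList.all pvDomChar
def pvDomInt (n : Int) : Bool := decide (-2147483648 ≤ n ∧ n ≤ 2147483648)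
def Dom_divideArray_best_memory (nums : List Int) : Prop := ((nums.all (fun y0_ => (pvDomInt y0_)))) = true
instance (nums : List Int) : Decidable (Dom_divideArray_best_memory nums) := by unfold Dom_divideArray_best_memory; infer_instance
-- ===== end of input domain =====

-- B sorts a copy of the list and consumes it two equal elements at a time; A builds a
-- frequency dictionary and scans its counts for an odd one. Alternative algorithm, same values.

-- ===== PORT A =====
-- the 'for key in d.keys(): if d[key] % 2 != 0: return False' loop (d[key] via get?, always hit)
def pvALoop (d : PySem.Dict Int Int) : List Int → Bool
  | [] => true
  | k :: ks => if PySem.Int.mod ((d.get? k).getD 0) 2 ≠ 0 then false else pvALoop d ks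

def divideArray_best_memory (nums : List Int) : Bool :=
  let d := nums.foldl (fun d i => d.insert i (d.getD i 0 + 1)) PySem.Dict.empty
  pvALoop d d.keys

-- ===== PORT B =====
-- the 'while s: if len(s) < 2 or s[0] != s[1]: return False; s = s[2:]' loop
def pvBLoop : List Int → Bool
  | [] => true
  | [_] => false
  | a :: b :: r => if a ≠ b then false else pvBLoop r

def divideArray_best_memory_alt (nums : List Int) : Bool :=
  pvBLoop (PySem.List.sorted nums (fun x => x) false)

-- ===== PRECONDITION & SPEC =====
def Spec_divideArray_best_memory (nums : List Int) (out : Bool) : Prop := out = divideArray_best_memory_alt nums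
instance (nums : List Int) (out : Bool) : Decidable (Spec_divideArray_best_memory nums out) := by unfold Spec_divideArray_best_memory; infer_instance

-- ===== CLAIM (what is proved, stated in full; the proofs are below) =====
def Claim_equal_divideArray_best_memory : Prop := ∀ (nums : List Int), Dom_divideArray_best_memory nums → Spec_divideArray_best_memory nums (divideArray_best_memory nums)

-- ===== LEMMAS AND PROOFS =====

-- A's key loop over the counter dict checks parity of each count
theorem pvALoop_counter (nums : List Int) (ks : List Int) :
    pvALoop (PySem.Dict.counter nums) ks = decide (∀ k ∈ ks, nums.count k % 2 = 0) := by
  induction ks with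
  | nil => simp [pvALoop]
  | cons k ks ih =>
      have hget : ((PySem.Dict.counter nums).get? k).getD 0 = ((nums.count k : Nat) : Int) := by
        rw [← PySem.Dict.getD_eq_get?_getD, PySem.Dict.getD_counter]
      have hm : PySem.Int.mod ((nums.count k : Nat) : Int) 2 = ((nums.count k % 2 : Nat) : Int) := by
        rw [PySem.Int.mod_eq_emod_of_pos (by norm_num)]; omega
      simp only [pvALoop, hget, ih, hm]
      by_cases h : nums.count k % 2 = 0
      · simp [h]
      · have hne : ((nums.count k % 2 : Nat) : Int) ≠ 0 := by exact_mod_cast h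
        rw [if_pos hne]
        symm
        simp only [decide_eq_false_iff_not]
        intro hall
        exact h (hall k (by simp))

theorem pvA_char (nums : List Int) :
    divideArray_best_memory nums = decide (∀ k ∈ nums, nums.count k % 2 = 0) := by
  unfold divideArray_best_memory
  simp only [PySem.Dict.foldl_insert_getD_add_one_eq_counter, PySem.Dict.keys_counter,
      pvALoop_counter]
  simp only [decide_eq_decide]
  constructor <;> intro h k hk
  · exact h k ((PySem.Set.mem_ofList nums k).mpr hk)
  · exact h k ((PySem.Set.mem_ofList nums k).mp hk)

-- B's pair scan on a sorted list checks parity of every count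
theorem pvBLoop_char (l : List Int) (hs : l.Pairwise (· ≤ ·)) :
    pvBLoop l = decide (∀ k ∈ l, l.count k % 2 = 0) := by
  induction l using pvBLoop.induct with
  | case1 => simp [pvBLoop]
  | case2 a => simp [pvBLoop]
  | case3 a b r hab =>
      -- a ≠ b: a is strictly smaller than everything after it, so count a = 1 (odd)
      simp only [pvBLoop, if_pos hab]
      have h1 : a ≤ b := (List.pairwise_cons.mp hs).1 b (by simp)
      have hab' : a < b := lt_of_le_of_ne h1 hab
      have hr : ∀ x ∈ r, b ≤ x := (List.pairwise_cons.mp (List.pairwise_cons.mp hs).2).1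
      have hlt : ∀ x ∈ b :: r, a < x := by
        intro x hx
        rcases List.mem_cons.mp hx with rfl | hx'
        · exact hab'
        · exact lt_of_lt_of_le hab' (hr x hx')
      have hnm : a ∉ b :: r := fun hmem => lt_irrefl a (hlt a hmem)
      have hcount : (a :: b :: r).count a = 1 := by
        simp [List.count_eq_zero.mpr hnm]
      symm
      simp only [decide_eq_false_iff_not]
      intro hall
      have h2 := hall a (by simp)
      rw [hcount] at h2
      omega
  | case4 a b r hab ih =>
      -- a = b: drop the equal pair; parities are unchanged
      have hEq : a = b := not_not.mp hab
      subst hEq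
      simp only [pvBLoop]
      rw [if_neg (by simp)]
      have hs' : r.Pairwise (· ≤ ·) := ((List.pairwise_cons.mp (List.pairwise_cons.mp hs).2).2)
      rw [ih hs']
      have hc : ∀ x : Int, (a :: a :: r).count x = (if x = a then 2 else 0) + r.count x := by
        intro x
        rcases eq_or_ne x a with rfl | hx
        · simp; omega
        · simp [hx, Ne.symm hx]
      simp only [decide_eq_decide]
      constructor
      · intro h k hk
        rw [hc]
        by_cases hka : k = a
        · subst hka
          by_cases hkr : k ∈ r
          · have := h k hkr; rw [if_pos rfl]; omega
          · simp [List.count_eq_zero.mpr hkr]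
        · have hkr : k ∈ r := by
            rcases List.mem_cons.mp hk with rfl | hk'
            · exact absurd rfl hka
            · rcases List.mem_cons.mp hk' with rfl | hk''
              · exact absurd rfl hka
              · exact hk''
          have := h k hkr
          rw [if_neg hka]
          omega
      · intro h k hk
        have h2 := h k (List.mem_cons_of_mem _ (List.mem_cons_of_mem _ hk))
        rw [hc] at h2
        split_ifs at h2 <;> omega

theorem pvB_char (nums : List Int) :
    divideArray_best_memory_alt nums = decide (∀ k ∈ nums, nums.count k % 2 = 0) := by
  unfold divideArray_best_memory_alt
  have hperm : (PySem.List.sorted nums (fun x => x) false).Perm nums :=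
    PySem.List.sorted_perm nums (fun x => x) false
  rw [pvBLoop_char _ (PySem.List.sorted_pairwise nums (fun x => x))]
  simp only [decide_eq_decide]
  constructor <;> intro h k hk
  · have := h k (hperm.mem_iff.mpr hk)
    rwa [hperm.count_eq] at this
  · rw [hperm.count_eq]
    exact h k (hperm.mem_iff.mp hk)

-- ===== VERDICT (by name: the statement is the Claim_ definition above) =====
theorem divideArray_best_memory_spec : Claim_equal_divideArray_best_memory := by
  intro nums _
  show divideArray_best_memory nums = divideArray_best_memory_alt nums
  rw [pvA_char, pvB_char]
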